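-- pv_equiv track=rewrite | github.com/SSKR-collab/pilott | RockNet-main/GenerateCodeDistributedRocket.py | split_kernels
-- ===== SOURCE A (Python) =====
-- def split_kernels(num_nodes, num_kernels):
-- 	"""
-- 	Splits the neurons across multiple nodes.
--
-- 	Returns
-- 	-------
-- 		split: List(int) list containing the number of neurons for each device.
-- 	"""
-- 	split = [num_kernels // num_nodes for _ in range(num_nodes)]
-- 	i = 0
-- 	while i < num_kernels % num_nodes:
-- 		split[i] += 1
-- 		i += 1
--
-- 	kernel_idx = [0]
-- 	for l in split:
-- 		kernel_idx.append(kernel_idx[-1] + l)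
--
-- 	return split, kernel_idx
-- ===== SOURCE B (Python) =====
-- def split_kernels(num_nodes, num_kernels):
-- 	q, r = divmod(num_kernels, num_nodes)
-- 	split = [q + (1 if i < r else 0) for i in range(num_nodes)]
-- 	kernel_idx = [0] + [(k + 1) * q + min(k + 1, r) for k in range(num_nodes)]
-- 	return split, kernel_idx
-- ===== Notes on version B (the rewrite author's own statement) =====
-- stated objective: alternative
-- what changed: Replaces A's post-hoc in-place increment loop over the split list and the running prefix-sum loop for boundaries by a single comprehension using divmod and a closed-form boundary k*q + min(k, r).
import Mathlib
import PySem

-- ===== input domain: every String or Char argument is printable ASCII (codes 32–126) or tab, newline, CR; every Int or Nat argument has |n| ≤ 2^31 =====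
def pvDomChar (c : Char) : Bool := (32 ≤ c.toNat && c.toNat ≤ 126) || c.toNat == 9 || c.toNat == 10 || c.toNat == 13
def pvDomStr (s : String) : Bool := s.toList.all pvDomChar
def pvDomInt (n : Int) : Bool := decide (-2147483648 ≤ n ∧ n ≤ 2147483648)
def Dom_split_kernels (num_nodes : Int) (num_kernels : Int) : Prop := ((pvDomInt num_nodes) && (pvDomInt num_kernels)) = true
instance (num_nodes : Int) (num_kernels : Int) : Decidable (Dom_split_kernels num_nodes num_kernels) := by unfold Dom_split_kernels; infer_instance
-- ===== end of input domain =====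

-- B replaces A's in-place increment loop and running prefix-sum loop by a direct comprehension
-- and a closed-form boundary k*q + min(k, r) (objective: alternative; same asymptotic cost).

-- ===== PORT A =====
-- A's while loop: 'while i < r: split[i] += 1; i += 1'
def pvBump (split : List Int) (i r : Int) : List Int :=
  if _h : i < r then
    pvBump (PySem.List.pySetD split i (PySem.List.pyGetD split i 0 + 1)) (i + 1) r
  else split
termination_by (r - i).toNat
decreasing_by omega

def split_kernels (num_nodes : Int) (num_kernels : Int) : List Int × List Int :=
  let split := pvBump
    ((PySem.List.pyRange 0 num_nodes 1).map (fun _ => PySem.Int.floordiv num_kernels num_nodes))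
    0 (PySem.Int.mod num_kernels num_nodes)
  let kernel_idx := split.foldl (fun acc l => acc ++ [PySem.List.pyGetD acc (-1) 0 + l]) [0]
  (split, kernel_idx)

-- ===== PORT B =====
def split_kernels_alt (num_nodes : Int) (num_kernels : Int) : List Int × List Int :=
  let q := PySem.Int.floordiv num_kernels num_nodes
  let r := PySem.Int.mod num_kernels num_nodes
  let split := (PySem.List.pyRange 0 num_nodes 1).map (fun i => q + if i < r then 1 else 0)
  let kernel_idx := 0 :: (PySem.List.pyRange 0 num_nodes 1).map (fun k => (k + 1) * q + min (k + 1) r)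
  (split, kernel_idx)

-- ===== PRECONDITION & SPEC =====
-- Pre_ excludes only num_nodes = 0, on which both Pythons raise ZeroDivisionError.
def Pre_split_kernels (num_nodes : Int) (num_kernels : Int) : Prop := num_nodes ≠ 0
instance (num_nodes : Int) (num_kernels : Int) : Decidable (Pre_split_kernels num_nodes num_kernels) := by unfold Pre_split_kernels; infer_instance
def pvWitness_split_kernels : Int × Int := (4, 10)

def Spec_split_kernels (num_nodes : Int) (num_kernels : Int) (out : List Int × List Int) : Prop := out = split_kernels_alt num_nodes num_kernels
instance (num_nodes : Int) (num_kernels : Int) (out : List Int × List Int) : Decidable (Spec_split_kernels num_nodes num_kernels out) := by unfold Spec_split_kernels; infer_instance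

-- ===== CLAIM (what is proved, stated in full; the proofs are below) =====
def Claim_equal_split_kernels : Prop := ∀ (num_nodes : Int) (num_kernels : Int), Dom_split_kernels num_nodes num_kernels → Pre_split_kernels num_nodes num_kernels → Spec_split_kernels num_nodes num_kernels (split_kernels num_nodes num_kernels)

-- ===== LEMMAS AND PROOFS =====

lemma pvBump_length_aux : ∀ (m : Nat) (s : List Int) (i r : Int), (r - i).toNat = m →
    (pvBump s i r).length = s.length := by
  intro m
  induction m with
  | zero =>
      intro s i r hm
      rw [pvBump.eq_def, dif_neg (by omega)]
  | succ m ih =>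
      intro s i r hm
      by_cases h : i < r
      · rw [pvBump.eq_def, dif_pos h]
        rw [ih _ (i + 1) r (by omega), PySem.List.length_pySetD]
      · rw [pvBump.eq_def, dif_neg h]

lemma pvBump_length (s : List Int) (i r : Int) : (pvBump s i r).length = s.length :=
  pvBump_length_aux (r - i).toNat s i r rfl

lemma pvBump_getElem_aux : ∀ (m : Nat) (s : List Int) (i r : Int), (r - i).toNat = m →
    0 ≤ i → r ≤ s.length → ∀ (p : Nat) (hp : p < s.length),
    (pvBump s i r)[p]? =
      some (if i ≤ (p : Int) ∧ (p : Int) < r then s[p] + 1 else s[p]) := by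
  intro m
  induction m with
  | zero =>
      intro s i r hm h0 hr p hp
      rw [pvBump.eq_def, dif_neg (by omega), if_neg (by omega), List.getElem?_eq_getElem hp]
  | succ m ih =>
      intro s i r hm h0 hr p hp
      by_cases h : i < r
      · have hilen : i < (s.length : Int) := lt_of_lt_of_le h hr
        have hset : PySem.List.pySetD s i (PySem.List.pyGetD s i 0 + 1)
            = s.set i.toNat (s[i.toNat]'(by omega) + 1) := by
          rw [PySem.List.pyGetD_eq_getElem s 0 h0 hilen, PySem.List.pySetD_of_nonneg s _ h0]
        rw [pvBump.eq_def, dif_pos h]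
        rw [ih _ (i + 1) r (by omega) (by omega) (by rw [PySem.List.length_pySetD]; exact hr) p
          (by rw [PySem.List.length_pySetD]; exact hp)]
        by_cases hpi : p = i.toNat
        · subst hpi
          simp only [hset, List.getElem_set_self]
          split_ifs <;> first | rfl | omega
        · have hne : (s.set i.toNat (s[i.toNat]'(by omega) + 1))[p]'(by simpa using hp) = s[p] :=
            List.getElem_set_ne (by omega) (by simpa using hp)
          simp only [hset, hne]
          split_ifs <;> first | rfl | omega
      · rw [pvBump.eq_def, dif_neg h, if_neg (by omega), List.getElem?_eq_getElem hp]

lemma pvBump_getElem (r : Int) (s : List Int) (i : Int) (h0 : 0 ≤ i) (hr : r ≤ s.length)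
    (p : Nat) (hp : p < s.length) :
    (pvBump s i r)[p]'(by rw [pvBump_length]; exact hp) =
      if i ≤ (p : Int) ∧ (p : Int) < r then s[p] + 1 else s[p] := by
  have h := pvBump_getElem_aux (r - i).toNat s i r rfl h0 hr p hp
  rwa [List.getElem?_eq_getElem (by rw [pvBump_length]; exact hp), Option.some_inj] at h

-- the running-boundary loop of A as a scan
def pvScan (c : Int) : List Int → List Int
  | [] => []
  | l :: t => (c + l) :: pvScan (c + l) t

lemma pvScan_length (c : Int) (s : List Int) : (pvScan c s).length = s.length := by
  induction s generalizing c with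
  | nil => rfl
  | cons l t ih => simp [pvScan, ih]

lemma pvScan_getElem (c : Int) (s : List Int) (k : Nat) (hk : k < s.length) :
    (pvScan c s)[k]'(by rw [pvScan_length]; exact hk) = c + (s.take (k + 1)).sum := by
  induction s generalizing c k with
  | nil => simp at hk
  | cons l t ih =>
      cases k with
      | zero => simp [pvScan]
      | succ k =>
          have := ih (c + l) k (by simpa using hk)
          simp only [pvScan, List.getElem_cons_succ, List.take_succ_cons, List.sum_cons, this]
          ring

lemma pvFoldl_scan (s : List Int) (acc : List Int) (h : acc ≠ []) :
    s.foldl (fun acc l => acc ++ [PySem.List.pyGetD acc (-1) 0 + l]) acc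
      = acc ++ pvScan (acc.getLast h) s := by
  induction s generalizing acc with
  | nil => simp [pvScan]
  | cons l t ih =>
      simp only [List.foldl_cons]
      rw [PySem.List.pyGetD_neg_one acc 0 h]
      rw [ih (acc ++ [acc.getLast h + l]) (by simp)]
      simp [pvScan]

lemma pvSumB (q r : Int) (hr : 0 ≤ r) (m : Nat) :
    ((List.range m).map (fun (j : Nat) => q + if (j : Int) < r then 1 else 0)).sum
      = m * q + min (m : Int) r := by
  induction m with
  | zero => simp; omega
  | succ m ih =>
      rw [List.range_succ, List.map_append, List.sum_append, ih]
      simp only [List.map_cons, List.map_nil, List.sum_cons, List.sum_nil]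
      push_cast
      have hq : ((m : Int) + 1) * q = (m : Int) * q + q := by ring
      omega

lemma pv_main_pos (nn nk : Int) (hpos : 0 < nn) :
    split_kernels nn nk = split_kernels_alt nn nk := by
  set q := PySem.Int.floordiv nk nn with hq
  set r := PySem.Int.mod nk nn with hrdef
  have hr0 : 0 ≤ r := PySem.Int.mod_nonneg nk hpos
  have hrlt : r < nn := PySem.Int.mod_lt nk hpos
  set n := nn.toNat with hn
  have hnn : nn = (n : Int) := by omega
  have hrange : PySem.List.pyRange 0 nn 1 = (List.range n).map (fun (k : Nat) => (k : Int)) := by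
    rw [hnn]; exact PySem.List.pyRange_zero_natCast n
  -- the two split lists agree
  have hsplit : pvBump ((PySem.List.pyRange 0 nn 1).map (fun _ => q)) 0 r
      = (PySem.List.pyRange 0 nn 1).map (fun i => q + if i < r then 1 else 0) := by
    apply List.ext_getElem
    · simp [pvBump_length]
    · intro p hp1 hp2
      have hplen : p < n := by
        rw [pvBump_length] at hp1; simpa [hrange] using hp1
      have hlen : ((PySem.List.pyRange 0 nn 1).map (fun _ => q)).length = n := by
        simp [hrange]
      rw [pvBump_getElem r _ 0 (le_refl 0) (by rw [hlen]; omega) p (by rw [hlen]; exact hplen)]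
      simp only [hrange, List.map_map, Function.comp, List.getElem_map, List.getElem_range]
      split_ifs <;> omega
  -- now the boundary lists
  unfold split_kernels split_kernels_alt
  simp only [← hq, ← hrdef, hsplit]
  refine Prod.ext rfl ?_
  rw [pvFoldl_scan _ [0] (by simp)]
  simp only [List.getLast_singleton, List.singleton_append]
  refine List.ext_getElem (by simp [pvScan_length, hrange]) ?_
  intro k hk1 hk2
  cases k with
  | zero => rfl
  | succ k =>
      simp only [List.getElem_cons_succ]
      have hklt : k < n := by
        simp only [pvScan_length, List.length_cons, hrange, List.length_map,
          List.length_range] at hk1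
        omega
      rw [pvScan_getElem 0 _ k (by simp [hrange]; omega)]
      simp only [hrange, List.map_map, ← List.map_take, List.take_range, List.getElem_map,
        List.getElem_range, Function.comp_def]
      have hmin : min (k + 1) n = k + 1 := by omega
      rw [hmin, pvSumB q r hr0 (k + 1)]
      push_cast
      ring

lemma pv_main_neg (nn nk : Int) (hneg : nn < 0) :
    split_kernels nn nk = split_kernels_alt nn nk := by
  have hrange : PySem.List.pyRange 0 nn 1 = [] := by
    simp [PySem.List.pyRange]; omega
  have hr : PySem.Int.mod nk nn ≤ 0 := (PySem.Int.mod_neg_bounds nk hneg).2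
  unfold split_kernels split_kernels_alt
  rw [hrange]
  simp only [List.map_nil]
  rw [pvBump.eq_def, dif_neg (by omega)]
  rfl

-- ===== VERDICT (by name: the statement is the Claim_ definition above) =====
theorem split_kernels_spec : Claim_equal_split_kernels := by
  intro nn nk _hdom hpre
  unfold Spec_split_kernels
  rcases lt_or_gt_of_ne hpre with h | h
  · exact (pv_main_neg nn nk h).symm ▸ rfl
  · exact (pv_main_pos nn nk h).symm ▸ rfl
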